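-- pv_equiv track=rewrite | github.com/fontkie/metals-quant-model | src/load_data.py | detect_date_col
-- ===== SOURCE A (Python) =====
-- DATE_CANDS = ["date", "Date", "DATE", "trade_date", "TradeDate", "timestamp", "ts"]
--
-- def detect_date_col(cols):
--     # Case-insensitive match over trimmed names
--     name_map = {c: c.strip() for c in cols}
--     cols_trim = [c.strip() for c in cols]
--     lower_to_orig = {}
--     for orig, trimmed in name_map.items():
--         lower_to_orig.setdefault(trimmed.lower(), orig)
--     for cand in DATE_CANDS:
--         if cand.lower() in lower_to_orig:
--             return lower_to_orig[cand.lower()]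
--     # Fallback common names
--     for c in cols:
--         if c.strip().lower().startswith("date"):
--             return c
--     raise KeyError(f"No date-like column found. Looked for {DATE_CANDS} or columns starting with 'date'.")
-- ===== SOURCE B (Python) =====
-- DATE_CANDS = ["date", "Date", "DATE", "trade_date", "TradeDate", "timestamp", "ts"]
--
-- # candidate-priority ranks, built once at module load
-- _RANKS = {}
-- for _i, _cand in enumerate(DATE_CANDS):
--     _RANKS.setdefault(_cand.lower(), _i)
--
-- def detect_date_col(cols):
--     # Single left-to-right pass: score each column by candidate priority and keep the
--     # best-ranked column seen so far (first occurrence wins ties).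
--     n = len(DATE_CANDS)
--     best, best_rank = None, n + 1
--     for c in cols:
--         key = c.strip().lower()
--         r = _RANKS.get(key, n if key.startswith("date") else n + 1)
--         if r < best_rank:
--             best, best_rank = c, r
--     if best is None or best_rank > n:
--         raise KeyError(f"No date-like column found. Looked for {DATE_CANDS} or columns starting with 'date'.")
--     return best
-- ===== Notes on version B (the rewrite author's own statement) =====
-- stated objective: alternative
-- what changed: Replaces A's build-two-dicts-then-candidate-lookup with a single left-to-right pass over cols that scores each column by candidate-priority rank (precomputed from DATE_CANDS, startswith-'date' as lowest rank) and keeps the best-ranked column seen so far, first occurrence winning ties.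
-- outside the precondition, e.g. on detect_date_col(['foo']): A raises KeyError, B raises KeyError
import Mathlib
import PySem

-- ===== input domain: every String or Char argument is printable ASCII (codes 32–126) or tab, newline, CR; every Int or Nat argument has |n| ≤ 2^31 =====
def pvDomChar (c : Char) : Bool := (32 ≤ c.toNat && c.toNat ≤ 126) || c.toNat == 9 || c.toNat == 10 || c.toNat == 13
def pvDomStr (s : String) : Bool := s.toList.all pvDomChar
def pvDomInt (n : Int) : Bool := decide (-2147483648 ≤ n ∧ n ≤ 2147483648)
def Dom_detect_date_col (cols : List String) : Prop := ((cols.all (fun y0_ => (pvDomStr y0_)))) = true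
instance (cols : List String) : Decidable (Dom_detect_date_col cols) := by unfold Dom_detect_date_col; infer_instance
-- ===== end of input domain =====

-- B replaces A's build-two-dicts-then-candidate-lookup by a single left-to-right pass over cols
-- keeping the best-priority-ranked column seen so far (first occurrence wins ties); same result
-- on every input where A returns (alternative decomposition, not claimed faster).

def DATE_CANDS : List String := ["date", "Date", "DATE", "trade_date", "TradeDate", "timestamp", "ts"]

-- ===== PORT A =====
def detect_date_col (cols : List String) : String :=
  let name_map : PySem.Dict String String :=
    cols.foldl (fun d c => d.insert c (PySem.Str.strip c)) PySem.Dict.empty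
  let _cols_trim := cols.map PySem.Str.strip
  let lower_to_orig : PySem.Dict String String :=
    name_map.items.foldl (fun d p => d.setdefault (PySem.Str.lower p.2) p.1) PySem.Dict.empty
  match DATE_CANDS.find? (fun cand => lower_to_orig.contains (PySem.Str.lower cand)) with
  | some cand => lower_to_orig.getD (PySem.Str.lower cand) ""
  | none =>
    match cols.find? (fun c => PySem.Str.startswith (PySem.Str.lower (PySem.Str.strip c)) "date") with
    | some c => c
    | none => ""  -- Python raises KeyError here; excluded by Pre_

-- ===== PORT B =====
-- _RANKS, built once at module load (B-side helper)
def pvRanksB : PySem.Dict String Int :=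
  (PySem.List.enumerate DATE_CANDS).foldl
    (fun d p => d.setdefault (PySem.Str.lower p.2) p.1) PySem.Dict.empty

def detect_date_col_alt (cols : List String) : String :=
  let n : Int := (DATE_CANDS.length : Int)
  let res : Option String × Int :=
    cols.foldl (fun acc c =>
      let key := PySem.Str.lower (PySem.Str.strip c)
      let r := pvRanksB.getD key (if PySem.Str.startswith key "date" then n else n + 1)
      if r < acc.2 then (some c, r) else acc) ((none : Option String), n + 1)
  match res.1 with
  | none => ""  -- Python raises KeyError here; excluded by Pre_
  | some b => if res.2 > n then "" else b

-- ===== PRECONDITION & SPEC =====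
-- Pre_ excludes exactly the inputs with no date-like column, on which Python A (and B) raise KeyError.
def Pre_detect_date_col (cols : List String) : Prop :=
  (cols.any (fun c =>
    PySem.Str.startswith (PySem.Str.lower (PySem.Str.strip c)) "date" ||
    PySem.Str.lower (PySem.Str.strip c) == "trade_date" ||
    PySem.Str.lower (PySem.Str.strip c) == "tradedate" ||
    PySem.Str.lower (PySem.Str.strip c) == "timestamp" ||
    PySem.Str.lower (PySem.Str.strip c) == "ts")) = true
instance (cols : List String) : Decidable (Pre_detect_date_col cols) := by
  unfold Pre_detect_date_col; infer_instance
def pvWitness_detect_date_col : List String := [" Date "]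

def Spec_detect_date_col (cols : List String) (out : String) : Prop := out = detect_date_col_alt cols
instance (cols : List String) (out : String) : Decidable (Spec_detect_date_col cols out) := by unfold Spec_detect_date_col; infer_instance

-- ===== CLAIM (what is proved, stated in full; the proofs are below) =====
def Claim_equal_detect_date_col : Prop := ∀ (cols : List String), Dom_detect_date_col cols → Pre_detect_date_col cols → Spec_detect_date_col cols (detect_date_col cols)

-- ===== LEMMAS AND PROOFS =====

-- trimmed-lowercase key of a column
def rkey (c : String) : String := PySem.Str.lower (PySem.Str.strip c)

-- priority rank of a column (0 best; 8 = not date-like); matches B's ranks dict + defaults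
def rk (c : String) : Int :=
  if rkey c = "date" then 0
  else if rkey c = "trade_date" then 3
  else if rkey c = "tradedate" then 4
  else if rkey c = "timestamp" then 5
  else if rkey c = "ts" then 6
  else if PySem.Str.startswith (rkey c) "date" then 7 else 8

-- left-to-right "first argmin by rank", computed structurally
def am : List String → Option (String × Int)
  | [] => none
  | c :: cs =>
    match am cs with
    | none => some (c, rk c)
    | some (b, m) => if rk c ≤ m then some (c, rk c) else some (b, m)

-- ---- lemmas about A (reduce A to a candidate-priority chain of find?s) ----

-- The name_map fold keeps only first occurrences with value strip(key); a first-match scan of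
-- its items equals a first-match scan of cols (a duplicate key would re-insert the same pair).
theorem find_items_name_map (q : String → Bool) :
    ∀ (cols : List String) (d : PySem.Dict String String),
      (∀ p ∈ d.items, p.2 = PySem.Str.strip p.1) →
      ((cols.foldl (fun d c => d.insert c (PySem.Str.strip c)) d).items).find? (fun p => q p.2)
        = (d.items.find? (fun p => q p.2)).or
            ((cols.find? (fun c => q (PySem.Str.strip c))).map (fun c => (c, PySem.Str.strip c))) := by
  intro cols
  induction cols with
  | nil => intro d hinv; simp
  | cons c cs ih =>
    intro d hinv
    simp only [List.foldl_cons, List.find?_cons]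
    by_cases hc : d.contains c = true
    · have hitems : (d.insert c (PySem.Str.strip c)).items = d.items := by
        rw [PySem.Dict.items_insert_of_contains d (PySem.Str.strip c) hc]
        have : ∀ p ∈ d.items, (if (p.1 == c) = true then (c, PySem.Str.strip c) else p) = p := by
          intro p hp
          by_cases h : p.1 = c
          · have h2 := hinv p hp
            cases p; simp_all
          · simp [h]
        calc List.map (fun p => if (p.1 == c) = true then (c, PySem.Str.strip c) else p) d.items
            = List.map id d.items := List.map_congr_left (by simpa using this)
          _ = d.items := List.map_id _
      have hmem : (c, PySem.Str.strip c) ∈ d.items := by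
        have : c ∈ d.keys := (PySem.Dict.contains_iff_mem_keys d c).mp hc
        simp only [PySem.Dict.keys, List.mem_map] at this
        obtain ⟨p, hp, hpc⟩ := this
        have := hinv p hp
        have : p = (c, PySem.Str.strip c) := by
          cases p; simp_all
        rwa [this] at hp
      have hinv' : ∀ p ∈ (d.insert c (PySem.Str.strip c)).items, p.2 = PySem.Str.strip p.1 := by
        rw [hitems]; exact hinv
      rw [ih _ hinv', hitems]
      cases hfind : d.items.find? (fun p => q p.2) with
      | some p => simp
      | none =>
        have hq : q (PySem.Str.strip c) = false := by
          have := List.find?_eq_none.mp hfind _ hmem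
          simpa using this
        simp [hq]
    · have hitems : (d.insert c (PySem.Str.strip c)).items = d.items ++ [(c, PySem.Str.strip c)] :=
        PySem.Dict.items_insert_of_not_contains d (PySem.Str.strip c) (by simpa using hc)
      have hinv' : ∀ p ∈ (d.insert c (PySem.Str.strip c)).items, p.2 = PySem.Str.strip p.1 := by
        rw [hitems]; intro p hp
        rcases List.mem_append.mp hp with h | h
        · exact hinv p h
        · simp at h; simp [h]
      rw [ih _ hinv', hitems, List.find?_append]
      cases hfind : d.items.find? (fun p => q p.2) with
      | some p => simp
      | none =>
        cases hq : q (PySem.Str.strip c) <;> simp [List.find?, hq]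

theorem get_setdefault_fold :
    ∀ (l : List (String × String)) (d : PySem.Dict String String) (k : String),
      (l.foldl (fun d p => d.setdefault (PySem.Str.lower p.2) p.1) d).get? k
        = (d.get? k).or ((l.find? (fun p => PySem.Str.lower p.2 == k)).map (fun p => p.1)) := by
  intro l
  induction l with
  | nil => intro d k; simp
  | cons p rest ih =>
    intro d k
    simp only [List.foldl_cons, List.find?_cons]
    rw [ih]
    by_cases h : PySem.Str.lower p.2 = k
    · subst h
      simp only [beq_self_eq_true, PySem.Dict.get?_setdefault_self]
      cases hd : d.get? (PySem.Str.lower p.2) <;> simp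
    · have hb : (PySem.Str.lower p.2 == k) = false := by simp [h]
      rw [PySem.Dict.get?_setdefault_of_ne (d := d) (v := p.1) (Ne.symm h)]
      simp [hb]

-- lower_to_orig, looked up at k, is exactly "first column whose trimmed lowered name is k".
theorem lto_get (cols : List String) (k : String) :
    (((cols.foldl (fun d c => d.insert c (PySem.Str.strip c)) PySem.Dict.empty).items).foldl
        (fun d p => d.setdefault (PySem.Str.lower p.2) p.1) PySem.Dict.empty).get? k
      = cols.find? (fun c => rkey c == k) := by
  rw [get_setdefault_fold,
      find_items_name_map (fun v => PySem.Str.lower v == k) cols PySem.Dict.empty (by simp [PySem.Dict.empty])]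
  simp [PySem.Dict.empty, Option.map_map, rkey]
  cases List.find? (fun c => PySem.Str.lower (PySem.Str.strip c) == k) cols <;> rfl

-- A as a candidate-priority chain of first-match scans over cols
theorem A_eq_chain (cols : List String) :
    detect_date_col cols =
      match ((cols.find? (fun c => rkey c == "date")).or
             ((cols.find? (fun c => rkey c == "trade_date")).or
              ((cols.find? (fun c => rkey c == "tradedate")).or
               ((cols.find? (fun c => rkey c == "timestamp")).or
                (cols.find? (fun c => rkey c == "ts")))))) with
      | some c => c
      | none =>
        match cols.find? (fun c => PySem.Str.startswith (rkey c) "date") with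
        | some c => c
        | none => "" := by
  show (match DATE_CANDS.find? (fun cand =>
      (((cols.foldl (fun (d : PySem.Dict String String) c => d.insert c (PySem.Str.strip c)) PySem.Dict.empty).items).foldl
        (fun (d : PySem.Dict String String) (p : String × String) => d.setdefault (PySem.Str.lower p.2) p.1) PySem.Dict.empty).contains
          (PySem.Str.lower cand)) with
    | some cand =>
      (((cols.foldl (fun (d : PySem.Dict String String) c => d.insert c (PySem.Str.strip c)) PySem.Dict.empty).items).foldl
        (fun (d : PySem.Dict String String) (p : String × String) => d.setdefault (PySem.Str.lower p.2) p.1) PySem.Dict.empty).getD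
          (PySem.Str.lower cand) ""
    | none =>
      match cols.find? (fun c => PySem.Str.startswith (PySem.Str.lower (PySem.Str.strip c)) "date") with
      | some c => c
      | none => "") = _
  have hpred : (fun cand => (((cols.foldl (fun d c => d.insert c (PySem.Str.strip c)) PySem.Dict.empty).items).foldl
        (fun d p => d.setdefault (PySem.Str.lower p.2) p.1) PySem.Dict.empty).contains (PySem.Str.lower cand))
      = (fun cand => (cols.find? (fun c => rkey c == PySem.Str.lower cand)).isSome) := by
    funext cand
    rw [PySem.Dict.contains_eq_isSome_get?, lto_get]
  rw [hpred]
  have hgetD : ∀ (k : String),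
      (((cols.foldl (fun d c => d.insert c (PySem.Str.strip c)) PySem.Dict.empty).items).foldl
        (fun d p => d.setdefault (PySem.Str.lower p.2) p.1) PySem.Dict.empty).getD k ""
      = (cols.find? (fun c => rkey c == k)).getD "" := by
    intro k
    rw [PySem.Dict.getD_eq_get?_getD, lto_get]
  simp only [DATE_CANDS, List.find?,
    show PySem.Str.lower "date" = "date" from by decide,
    show PySem.Str.lower "Date" = "date" from by decide,
    show PySem.Str.lower "DATE" = "date" from by decide,
    show PySem.Str.lower "trade_date" = "trade_date" from by decide,
    show PySem.Str.lower "TradeDate" = "tradedate" from by decide,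
    show PySem.Str.lower "timestamp" = "timestamp" from by decide,
    show PySem.Str.lower "ts" = "ts" from by decide]
  cases h0 : cols.find? (fun c => rkey c == "date") with
  | some x => simp [hgetD, show PySem.Str.lower "date" = "date" from by decide, h0]
  | none =>
    simp only [Option.isSome_none, Option.none_or]
    cases h3 : cols.find? (fun c => rkey c == "trade_date") with
    | some x => simp [hgetD, show PySem.Str.lower "trade_date" = "trade_date" from by decide, h3]
    | none =>
      simp only [Option.isSome_none, Option.none_or]
      cases h4 : cols.find? (fun c => rkey c == "tradedate") with
      | some x => simp [hgetD, show PySem.Str.lower "TradeDate" = "tradedate" from by decide, h4]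
      | none =>
        simp only [Option.isSome_none, Option.none_or]
        cases h5 : cols.find? (fun c => rkey c == "timestamp") with
        | some x => simp [hgetD, show PySem.Str.lower "timestamp" = "timestamp" from by decide, h5]
        | none =>
          simp only [Option.isSome_none, Option.none_or]
          cases h6 : cols.find? (fun c => rkey c == "ts") with
          | some x => simp [hgetD, show PySem.Str.lower "ts" = "ts" from by decide, h6]
          | none =>
            simp only [Option.isSome_none]
            simp [rkey]

-- ---- lemmas about B (reduce B to am) ----

set_option maxRecDepth 8192 in
theorem ranks_getD (k : String) (d : Int) :
    pvRanksB.getD k d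
      = if k = "date" then 0 else if k = "trade_date" then 3 else if k = "tradedate" then 4
        else if k = "timestamp" then 5 else if k = "ts" then 6 else d := by
  have hlit : pvRanksB
      = PySem.Dict.mk [("date",0),("trade_date",3),("tradedate",4),("timestamp",5),("ts",6)] := by decide
  rw [hlit, PySem.Dict.getD_eq_get?_getD]
  clear hlit
  simp only [PySem.Dict.get?_mk_cons]
  by_cases h1 : k = "date"
  · subst h1; rw [if_pos (by decide)]; simp
  · rw [if_neg (by rw [beq_iff_eq]; exact fun h => h1 h.symm)]
    by_cases h2 : k = "trade_date"
    · subst h2; rw [if_pos (by decide)]; simp [h1]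
    · rw [if_neg (by rw [beq_iff_eq]; exact fun h => h2 h.symm)]
      by_cases h3 : k = "tradedate"
      · subst h3; rw [if_pos (by decide)]; simp [h1, h2]
      · rw [if_neg (by rw [beq_iff_eq]; exact fun h => h3 h.symm)]
        by_cases h4 : k = "timestamp"
        · subst h4; rw [if_pos (by decide)]; simp [h1, h2, h3]
        · rw [if_neg (by rw [beq_iff_eq]; exact fun h => h4 h.symm)]
          by_cases h5 : k = "ts"
          · subst h5; rw [if_pos (by decide)]; simp [h1, h2, h3, h4]
          · rw [if_neg (by rw [beq_iff_eq]; exact fun h => h5 h.symm)]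
            simp [h1, h2, h3, h4, h5, PySem.Dict.get?]

-- B's per-column score (dict lookup with startswith default) is exactly rk
theorem rk_eq (c : String) :
    pvRanksB.getD
      (PySem.Str.lower (PySem.Str.strip c))
      (if PySem.Str.startswith (PySem.Str.lower (PySem.Str.strip c)) "date" then (7:Int) else 8)
    = rk c := by
  rw [ranks_getD]
  unfold rk rkey
  norm_num

theorem foldB_eq_am :
    ∀ (cols : List String) (b : Option String) (br : Int),
      cols.foldl (fun acc c => if rk c < acc.2 then (some c, rk c) else acc) (b, br)
        = match am cols with
          | none => (b, br)
          | some (p, m) => if m < br then (some p, m) else (b, br) := by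
  intro cols
  induction cols with
  | nil => intro b br; simp [am]
  | cons c cs ih =>
    intro b br
    simp only [List.foldl_cons, am]
    by_cases hc : rk c < br
    · rw [if_pos hc, ih]
      cases ham : am cs with
      | none => simp [hc]
      | some p =>
        obtain ⟨q, m⟩ := p
        by_cases h1 : rk c ≤ m
        · simp [h1, hc, show ¬ m < rk c from by omega]
        · simp [h1, show m < rk c from by omega, show m < br from by omega]
    · rw [if_neg hc, ih]
      cases ham : am cs with
      | none => simp [hc]
      | some p =>
        obtain ⟨q, m⟩ := p
        by_cases h1 : rk c ≤ m
        · simp [h1, show ¬ rk c < br from hc, show ¬ m < br from by omega]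
        · simp [h1]

theorem B_eq_am (cols : List String) :
    detect_date_col_alt cols =
      match am cols with
      | none => ""
      | some (c, m) => if m ≤ 7 then c else "" := by
  unfold detect_date_col_alt
  simp only [show ((DATE_CANDS.length : Int)) = 7 from by decide,
    show (7:Int) + 1 = 8 from by norm_num, rk_eq]
  rw [foldB_eq_am]
  cases ham : am cols with
  | none => rfl
  | some p =>
    obtain ⟨q, m⟩ := p
    by_cases hm : m < 8
    · simp only [if_pos hm]
      split_ifs <;> first | rfl | omega
    · simp only [if_neg hm]
      rw [if_neg (by omega)]

-- ---- am ↔ chain ----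

theorem am_eq_none_iff (cols : List String) : am cols = none ↔ cols = [] := by
  cases cols with
  | nil => simp [am]
  | cons c cs =>
    simp only [am]
    cases am cs with
    | none => simp
    | some p => obtain ⟨b, m⟩ := p; constructor <;> intro h <;> simp_all; split at h <;> simp_all

theorem am_spec :
    ∀ (cols : List String) (b : String) (m : Int), am cols = some (b, m) →
      cols.find? (fun c => rk c == m) = some b ∧ ∀ c ∈ cols, m ≤ rk c := by
  intro cols
  induction cols with
  | nil => intro b m h; simp [am] at h
  | cons c cs ih =>
    intro b m h
    simp only [am] at h
    cases ham : am cs with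
    | none =>
      rw [ham] at h
      have hnil : cs = [] := (am_eq_none_iff cs).mp ham
      subst hnil
      simp at h
      obtain ⟨hb, hm⟩ := h
      subst hb hm
      simp [List.find?]
    | some p =>
      obtain ⟨b', m'⟩ := p
      rw [ham] at h
      have h' : (if rk c ≤ m' then some (c, rk c) else some (b', m')) = some (b, m) := h
      obtain ⟨hf, hmin⟩ := ih b' m' ham
      by_cases hle : rk c ≤ m'
      · rw [if_pos hle] at h'
        simp at h'
        obtain ⟨hb, hm⟩ := h'
        subst hb hm
        refine ⟨by simp [List.find?], ?_⟩
        intro x hx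
        rw [List.mem_cons] at hx
        rcases hx with rfl | hx
        · omega
        · exact le_trans hle (hmin _ hx)
      · rw [if_neg hle] at h'
        simp at h'
        obtain ⟨hb, hm⟩ := h'
        subst hb hm
        have hne : (rk c == m') = false := by simp; omega
        refine ⟨by simp [List.find?, hne, hf], ?_⟩
        intro x hx
        rw [List.mem_cons] at hx
        rcases hx with rfl | hx
        · omega
        · exact hmin _ hx

-- rank takes only these values
theorem rk_cases (c : String) : rk c = 0 ∨ rk c = 3 ∨ rk c = 4 ∨ rk c = 5 ∨ rk c = 6 ∨ rk c = 7 ∨ rk c = 8 := by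
  unfold rk; split_ifs <;> simp

-- predicate bridges: exact-candidate membership tests in terms of rk
theorem pred_date (c : String) : (rkey c == "date") = (rk c == (0:Int)) := by
  unfold rk; split_ifs with h1 h2 h3 h4 h5 h6 <;> simp_all
theorem pred_td (c : String) : (rkey c == "trade_date") = (rk c == (3:Int)) := by
  unfold rk; split_ifs with h1 h2 h3 h4 h5 h6 <;> simp_all
theorem pred_tdd (c : String) : (rkey c == "tradedate") = (rk c == (4:Int)) := by
  unfold rk; split_ifs with h1 h2 h3 h4 h5 h6 <;> simp_all
theorem pred_ts (c : String) : (rkey c == "timestamp") = (rk c == (5:Int)) := by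
  unfold rk; split_ifs with h1 h2 h3 h4 h5 h6 <;> simp_all
theorem pred_t (c : String) : (rkey c == "ts") = (rk c == (6:Int)) := by
  unfold rk; split_ifs with h1 h2 h3 h4 h5 h6 <;> simp_all
theorem pred_sw (c : String) : PySem.Str.startswith (rkey c) "date" = (rk c == (0:Int) || rk c == (7:Int)) := by
  unfold rk
  split_ifs with h1 h2 h3 h4 h5 h6 <;> (try rw [h1]) <;> (try rw [h2]) <;> (try rw [h3]) <;> (try rw [h4]) <;> (try rw [h5]) <;> simp_all <;> decide

theorem find?_congr_mem {α : Type} (l : List α) (p q : α → Bool)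
    (h : ∀ x ∈ l, p x = q x) : l.find? p = l.find? q := by
  induction l with
  | nil => rfl
  | cons a rest ih =>
    simp only [List.find?_cons]
    rw [h a (by simp)]
    cases q a
    · exact ih (fun x hx => h x (by simp [hx]))
    · rfl

-- ===== VERDICT (by name: the statement is the Claim_ definition above) =====
theorem detect_date_col_spec : Claim_equal_detect_date_col := by
  intro cols _hdom _hpre
  unfold Spec_detect_date_col
  rw [A_eq_chain, B_eq_am]
  cases ham : am cols with
  | none =>
    have : cols = [] := (am_eq_none_iff cols).mp ham
    subst this; rfl
  | some p =>
    obtain ⟨b, m⟩ := p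
    obtain ⟨hfind, hmin⟩ := am_spec cols b m ham
    have hrkb : rk b = m := by
      have := List.find?_some hfind; simpa using this
    have hnone : ∀ (v : Int), v < m → cols.find? (fun c => rk c == v) = none := by
      intro v hv
      apply List.find?_eq_none.mpr
      intro x hx
      have := hmin x hx
      simp; omega
    have hsw7 : 7 ≤ m → cols.find? (fun c => PySem.Str.startswith (rkey c) "date")
        = cols.find? (fun c => rk c == (7:Int)) := by
      intro hm7
      apply find?_congr_mem
      intro x hx
      rw [pred_sw]
      have h0 := hmin x hx
      have hz : (rk x == (0:Int)) = false := by simp; omega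
      rw [hz]; simp
    rcases rk_cases b with h | h | h | h | h | h | h <;> rw [hrkb] at h <;> subst h
    · simp only [pred_date, hfind]; simp
    · simp only [pred_date, pred_td, hnone 0 (by omega), hfind]; simp
    · simp only [pred_date, pred_td, pred_tdd, hnone 0 (by omega), hnone 3 (by omega), hfind]; simp
    · simp only [pred_date, pred_td, pred_tdd, pred_ts, hnone 0 (by omega), hnone 3 (by omega),
        hnone 4 (by omega), hfind]; simp
    · simp only [pred_date, pred_td, pred_tdd, pred_ts, pred_t, hnone 0 (by omega), hnone 3 (by omega),
        hnone 4 (by omega), hnone 5 (by omega), hfind]; simp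
    · simp only [pred_date, pred_td, pred_tdd, pred_ts, pred_t, hnone 0 (by omega), hnone 3 (by omega),
        hnone 4 (by omega), hnone 5 (by omega), hnone 6 (by omega), hsw7 (by omega), hfind]; simp
    · simp only [pred_date, pred_td, pred_tdd, pred_ts, pred_t, hnone 0 (by omega), hnone 3 (by omega),
        hnone 4 (by omega), hnone 5 (by omega), hnone 6 (by omega)]
      rw [hsw7 (by omega), hnone 7 (by omega)]
      simp
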